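-- pv_equiv track=rewrite | github.com/EudOnline/infinitas-skill | scripts/review_lib.py | owner_review_unavoidable
-- ===== SOURCE A (Python) =====
-- def owner_review_unavoidable(owner, reviewers, required_groups, min_approvals):
--     if not owner:
--         return False
--     non_owner_reviewers = {
--         reviewer: data
--         for reviewer, data in (reviewers or {}).items()
--         if reviewer != owner
--     }
--     if len(non_owner_reviewers) < (min_approvals or 0):
--         return True
--     if required_groups:
--         covered_groups = set()
--         for reviewer_data in non_owner_reviewers.values():
--             covered_groups.update(reviewer_data.get('groups', []))
--         if any(group_name not in covered_groups for group_name in required_groups):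
--             return True
--     return False
-- ===== SOURCE B (Python) =====
-- def owner_review_unavoidable(owner, reviewers, required_groups, min_approvals):
--     if not owner:
--         return False
--     items = list((reviewers or {}).items())
--     if sum(1 for r, _ in items if r != owner) < (min_approvals or 0):
--         return True
--
--     def uncovered(group):
--         # True iff no non-owner reviewer carries `group`
--         for r, data in items:
--             if r != owner and group in data.get('groups', []):
--                 return False
--         return True
--
--     for g in (required_groups or []):
--         if uncovered(g):
--             return True
--     return False
-- ===== Notes on version B (the rewrite author's own statement) =====
-- stated objective: alternative
-- what changed: Drops A's filtered non-owner dict and covered_groups set entirely: B counts non-owner reviewers in one generator sum and decides group coverage by recursive per-required-group existence searches that skip the owner inline while scanning the raw reviewer items.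
import Mathlib
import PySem

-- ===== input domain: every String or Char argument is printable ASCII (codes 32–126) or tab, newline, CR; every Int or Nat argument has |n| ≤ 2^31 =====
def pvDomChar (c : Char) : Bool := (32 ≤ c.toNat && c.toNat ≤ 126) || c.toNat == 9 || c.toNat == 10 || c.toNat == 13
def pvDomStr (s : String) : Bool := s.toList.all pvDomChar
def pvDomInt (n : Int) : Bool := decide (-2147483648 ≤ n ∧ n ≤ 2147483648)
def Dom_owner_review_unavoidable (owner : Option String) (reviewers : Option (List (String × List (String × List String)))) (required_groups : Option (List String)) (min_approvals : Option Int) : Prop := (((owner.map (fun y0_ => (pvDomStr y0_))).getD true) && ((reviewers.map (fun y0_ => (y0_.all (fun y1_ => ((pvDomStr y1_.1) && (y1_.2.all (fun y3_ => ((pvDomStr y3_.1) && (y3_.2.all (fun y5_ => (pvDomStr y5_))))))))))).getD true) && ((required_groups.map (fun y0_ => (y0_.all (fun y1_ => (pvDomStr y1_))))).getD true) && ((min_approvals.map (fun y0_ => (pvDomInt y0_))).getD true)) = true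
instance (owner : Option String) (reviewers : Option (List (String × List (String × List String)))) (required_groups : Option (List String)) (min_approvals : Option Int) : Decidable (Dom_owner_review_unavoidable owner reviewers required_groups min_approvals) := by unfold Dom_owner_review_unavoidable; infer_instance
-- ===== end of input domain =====

-- B drops A's filtered dict and covered_groups set: it counts non-owner reviewers in one pass and
-- answers the group check by recursive per-required-group existence searches over the raw reviewer
-- items, skipping the owner inline (objective: alternative).
-- ===== PORT A =====
def owner_review_unavoidable (owner : Option String) (reviewers : Option (List (String × List (String × List String)))) (required_groups : Option (List String)) (min_approvals : Option Int) : Bool :=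
  if owner.getD "" = "" then false
  else
    let non_owner_reviewers : List (String × List (String × List String)) :=
      (reviewers.getD []).filter (fun p => p.1 ≠ owner.getD "")
    if (non_owner_reviewers.length : Int) < min_approvals.getD 0 then true
    else
      if (required_groups.getD []) ≠ [] then
        let covered_groups : PySem.Set String :=
          non_owner_reviewers.foldl
            (fun s p => PySem.Set.update s ((PySem.Dict.mk p.2).getD "groups" [])) PySem.Set.empty
        if (required_groups.getD []).any (fun g => !(PySem.Set.contains covered_groups g)) then true
        else false
      else false

-- ===== PORT B =====
-- sum(1 for r, _ in items if r != owner)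
def pvCountNonOwner (own : String) : List (String × List (String × List String)) → Int
  | [] => 0
  | p :: rest => (if p.1 ≠ own then 1 else 0) + pvCountNonOwner own rest

-- uncovered(group): early-return loop — no non-owner reviewer carries group
def pvUncovered (own : String) (group : String) : List (String × List (String × List String)) → Bool
  | [] => true
  | p :: rest =>
      if p.1 ≠ own ∧ ((PySem.Dict.mk p.2).getD "groups" []).contains group then false
      else pvUncovered own group rest

-- the for-loop over required groups: some group is covered by nobody
def pvCheck (own : String) (items : List (String × List (String × List String))) : List String → Bool
  | [] => false
  | g :: gs => if pvUncovered own g items then true else pvCheck own items gs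

def owner_review_unavoidable_alt (owner : Option String) (reviewers : Option (List (String × List (String × List String)))) (required_groups : Option (List String)) (min_approvals : Option Int) : Bool :=
  if owner.getD "" = "" then false
  else
    let items := reviewers.getD []
    if pvCountNonOwner (owner.getD "") items < min_approvals.getD 0 then true
    else pvCheck (owner.getD "") items (required_groups.getD [])

-- ===== PRECONDITION & SPEC =====
def Spec_owner_review_unavoidable (owner : Option String) (reviewers : Option (List (String × List (String × List String)))) (required_groups : Option (List String)) (min_approvals : Option Int) (out : Bool) : Prop := out = owner_review_unavoidable_alt owner reviewers required_groups min_approvals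
instance (owner : Option String) (reviewers : Option (List (String × List (String × List String)))) (required_groups : Option (List String)) (min_approvals : Option Int) (out : Bool) : Decidable (Spec_owner_review_unavoidable owner reviewers required_groups min_approvals out) := by unfold Spec_owner_review_unavoidable; infer_instance

-- ===== CLAIM (what is proved, stated in full; the proofs are below) =====
def Claim_equal_owner_review_unavoidable : Prop := ∀ (owner : Option String) (reviewers : Option (List (String × List (String × List String)))) (required_groups : Option (List String)) (min_approvals : Option Int), Dom_owner_review_unavoidable owner reviewers required_groups min_approvals → Spec_owner_review_unavoidable owner reviewers required_groups min_approvals (owner_review_unavoidable owner reviewers required_groups min_approvals)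

-- ===== LEMMAS AND PROOFS =====

-- B's running count equals the length of A's filtered reviewer list
theorem count_eq_filter_length (own : String) (l : List (String × List (String × List String))) :
    pvCountNonOwner own l = ((l.filter (fun p => p.1 ≠ own)).length : Int) := by
  induction l with
  | nil => simp [pvCountNonOwner]
  | cons a t ih =>
      by_cases h : a.1 ≠ own <;> simp [pvCountNonOwner, List.filter, h, ih] <;> omega

-- g is in the accumulated covered_groups set iff some element of the list contributes it
theorem mem_foldl_update {α : Type} (l : List α) (gr : α → List String) (s : PySem.Set String) (g : String) :
    g ∈ l.foldl (fun s p => PySem.Set.update s (gr p)) s ↔ g ∈ s ∨ ∃ p ∈ l, g ∈ gr p := by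
  induction l generalizing s with
  | nil => simp
  | cons a t ih =>
      simp [List.foldl, ih, PySem.Set.mem_update]
      tauto

-- B's recursive uncovered-scan (skipping the owner inline) equals the negation of membership in
-- A's covered_groups set built from the filtered list
theorem uncovered_eq_not_contains (own g : String) (l : List (String × List (String × List String))) :
    pvUncovered own g l
      = !(PySem.Set.contains
          ((l.filter (fun p => p.1 ≠ own)).foldl
            (fun s p => PySem.Set.update s ((PySem.Dict.mk p.2).getD "groups" [])) PySem.Set.empty) g) := by
  rw [Bool.eq_iff_iff]
  simp only [Bool.not_eq_eq_eq_not, Bool.not_true, Bool.not_eq_true', ← Bool.not_eq_true,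
    PySem.Set.contains_iff, mem_foldl_update]
  have key : pvUncovered own g l = true ↔ ∀ p ∈ l, ¬(p.1 ≠ own ∧ ((PySem.Dict.mk p.2).getD "groups" []).contains g) := by
    induction l with
    | nil => simp [pvUncovered]
    | cons a t ih =>
        by_cases h : a.1 ≠ own ∧ ((PySem.Dict.mk a.2).getD "groups" []).contains g
        · simp only [pvUncovered, if_pos h]
          constructor
          · intro hf; cases hf
          · intro hall; exact absurd h (hall a (by simp))
        · simp only [pvUncovered, if_neg h, ih]
          constructor
          · intro ht p hp
            rcases List.mem_cons.mp hp with rfl | hp'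
            · exact h
            · exact ht p hp'
          · intro hall p hp; exact hall p (List.mem_cons_of_mem _ hp)
  rw [key]
  simp only [PySem.Set.empty, List.mem_filter, List.contains_iff_mem]
  constructor
  · rintro h (hc | ⟨p, ⟨hp, hown⟩, hg⟩)
    · simp at hc
    · exact h p hp ⟨by simpa using hown, by simpa [List.contains_iff_mem] using hg⟩
  · intro h p hp ⟨hown, hg⟩
    exact h (Or.inr ⟨p, ⟨hp, by simpa using hown⟩, by simpa [List.contains_iff_mem] using hg⟩)

-- B's recursion over the required groups is an existential (any) over the uncovered test
theorem check_eq_any (own : String) (items : List (String × List (String × List String))) (gs : List String) :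
    pvCheck own items gs = gs.any (fun g => pvUncovered own g items) := by
  induction gs with
  | nil => simp [pvCheck]
  | cons g t ih =>
      by_cases h : pvUncovered own g items <;> simp [pvCheck, h, ih]

-- ===== VERDICT (by name: the statement is the Claim_ definition above) =====
theorem owner_review_unavoidable_spec : Claim_equal_owner_review_unavoidable := by
  intro owner reviewers required_groups min_approvals _
  unfold Spec_owner_review_unavoidable owner_review_unavoidable owner_review_unavoidable_alt
  by_cases ho : owner.getD "" = ""
  · simp [ho]
  · simp only [if_neg ho, count_eq_filter_length]
    by_cases hm : (((reviewers.getD []).filter (fun p => p.1 ≠ owner.getD "")).length : Int) < min_approvals.getD 0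
    · rw [if_pos hm, if_pos hm]
    · rw [if_neg hm, if_neg hm, check_eq_any]
      have hpt : ∀ g, pvUncovered (owner.getD "") g (reviewers.getD [])
          = !(PySem.Set.contains
              (((reviewers.getD []).filter (fun p => p.1 ≠ owner.getD "")).foldl
                (fun s p => PySem.Set.update s ((PySem.Dict.mk p.2).getD "groups" [])) PySem.Set.empty) g) :=
        fun g => uncovered_eq_not_contains _ g _
      by_cases hg : (required_groups.getD []) = []
      · simp [hg]
      · rw [if_pos hg]
        have : (required_groups.getD []).any (fun g =>
            !(PySem.Set.contains
              (((reviewers.getD []).filter (fun p => p.1 ≠ owner.getD "")).foldl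
                (fun s p => PySem.Set.update s ((PySem.Dict.mk p.2).getD "groups" [])) PySem.Set.empty) g))
          = (required_groups.getD []).any (fun g => pvUncovered (owner.getD "") g (reviewers.getD [])) := by
          congr 1; funext g; rw [hpt]
        rw [this]
        cases h : (required_groups.getD []).any (fun g => pvUncovered (owner.getD "") g (reviewers.getD [])) <;> simp
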